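-- pv_equiv track=rewrite | github.com/ewelkaw/artworks_classification | prepare_datasets.py | prepare_arts_info
-- ===== SOURCE A (Python) =====
-- def prepare_arts_info(artists, artists_info):
--     """Prepares information about amount of artworks of chosen artists."""
--     info = {}
--     for artist in artists:
--         if artist in artists_info.keys():
--             info[artist] = artists_info[artist]
--         else:
--             raise KeyError("We can not find provided artist.")
--     return info
-- ===== SOURCE B (Python) =====
-- def prepare_arts_info(artists, artists_info):
--     """Prepares information about amount of artworks of chosen artists."""
--     missing = [a for a in artists if a not in artists_info]
--     if missing:
--         raise KeyError("We can not find provided artist.")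
--     return {a: artists_info[a] for a in artists}
-- ===== Notes on version B (the rewrite author's own statement) =====
-- stated objective: simpler
-- what changed: Replaced A's single build-while-checking loop by validate-then-build: one comprehension collects missing artists (raising if any), then one dict comprehension constructs the result.
-- outside the precondition, e.g. on prepare_arts_info(['x'], {'a': 1}): A raises KeyError, B raises KeyError
import Mathlib
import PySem

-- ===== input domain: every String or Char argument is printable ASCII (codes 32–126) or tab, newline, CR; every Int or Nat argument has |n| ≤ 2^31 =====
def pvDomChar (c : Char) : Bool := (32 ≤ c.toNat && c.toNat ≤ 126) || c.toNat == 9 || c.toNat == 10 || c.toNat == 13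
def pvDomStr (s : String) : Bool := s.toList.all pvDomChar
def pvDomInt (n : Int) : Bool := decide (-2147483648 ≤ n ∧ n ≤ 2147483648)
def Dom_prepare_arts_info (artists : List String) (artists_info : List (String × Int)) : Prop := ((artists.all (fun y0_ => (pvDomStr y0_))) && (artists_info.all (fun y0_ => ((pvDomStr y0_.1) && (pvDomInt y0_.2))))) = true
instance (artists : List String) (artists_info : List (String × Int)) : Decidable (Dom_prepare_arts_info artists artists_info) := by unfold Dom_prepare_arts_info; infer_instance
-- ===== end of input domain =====

-- B validates first (collect missing artists, raise if any) then builds with one dict comprehension,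
-- instead of A's single loop that checks and inserts interleaved; same values, same KeyError cases.

-- ===== PORT A =====
-- the loop: per artist, check membership and insert, else raise (none = KeyError)
def prepareArtsLoopA (dct : PySem.Dict String Int) :
    List String → PySem.Dict String Int → Option (PySem.Dict String Int)
  | [], info => some info
  | a :: rest, info =>
    if dct.contains a then
      prepareArtsLoopA dct rest (info.insert a (dct.getD a 0))
    else
      none  -- raise KeyError("We can not find provided artist.")

def prepare_arts_info (artists : List String) (artists_info : List (String × Int)) : List (String × Int) :=
  ((prepareArtsLoopA (PySem.Dict.ofList artists_info) artists PySem.Dict.empty).getD PySem.Dict.empty).items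

-- ===== PORT B =====
def prepare_arts_info_alt (artists : List String) (artists_info : List (String × Int)) : List (String × Int) :=
  let dct := PySem.Dict.ofList artists_info
  let missing := artists.filter (fun a => !(dct.contains a))
  if missing ≠ [] then
    []  -- raise KeyError("We can not find provided artist.")
  else
    (artists.foldl (fun d a => d.insert a (dct.getD a 0)) PySem.Dict.empty).items

-- ===== PRECONDITION & SPEC =====
-- Pre_ excludes exactly the inputs where the Python A raises KeyError (some artist not a key of artists_info)
def Pre_prepare_arts_info (artists : List String) (artists_info : List (String × Int)) : Prop :=
  artists.all (fun a => (PySem.Dict.ofList artists_info).contains a) = true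
instance (artists : List String) (artists_info : List (String × Int)) : Decidable (Pre_prepare_arts_info artists artists_info) := by unfold Pre_prepare_arts_info; infer_instance
def pvWitness_prepare_arts_info : List String × (List (String × Int)) := (["a", "b"], [("a", 3), ("b", 0), ("c", 7)])

def Spec_prepare_arts_info (artists : List String) (artists_info : List (String × Int)) (out : List (String × Int)) : Prop := out = prepare_arts_info_alt artists artists_info
instance (artists : List String) (artists_info : List (String × Int)) (out : List (String × Int)) : Decidable (Spec_prepare_arts_info artists artists_info out) := by unfold Spec_prepare_arts_info; infer_instance

-- ===== CLAIM (what is proved, stated in full; the proofs are below) =====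
def Claim_equal_prepare_arts_info : Prop := ∀ (artists : List String) (artists_info : List (String × Int)), Dom_prepare_arts_info artists artists_info → Pre_prepare_arts_info artists artists_info → Spec_prepare_arts_info artists artists_info (prepare_arts_info artists artists_info)

-- ===== LEMMAS AND PROOFS =====
lemma prepareArtsLoopA_eq_foldl (dct : PySem.Dict String Int) (artists : List String)
    (h : artists.all (fun a => dct.contains a) = true) (info : PySem.Dict String Int) :
    prepareArtsLoopA dct artists info =
      some (artists.foldl (fun d a => d.insert a (dct.getD a 0)) info) := by
  induction artists generalizing info with
  | nil => rfl
  | cons a rest ih =>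
    simp only [List.all_cons, Bool.and_eq_true] at h
    simp only [prepareArtsLoopA, h.1, if_true, List.foldl_cons]
    exact ih h.2 _

-- ===== VERDICT (by name: the statement is the Claim_ definition above) =====
theorem prepare_arts_info_spec : Claim_equal_prepare_arts_info := by
  intro artists artists_info _ hpre
  unfold Spec_prepare_arts_info prepare_arts_info prepare_arts_info_alt
  have hmiss : artists.filter (fun a => !((PySem.Dict.ofList artists_info).contains a)) = [] := by
    simp only [List.filter_eq_nil_iff, Bool.not_eq_true]
    intro a ha
    simp [List.all_eq_true.mp hpre a ha]
  rw [prepareArtsLoopA_eq_foldl _ _ hpre]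
  simp [hmiss]
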